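-- pv_equiv track=rewrite | github.com/keyurgolani/ProblemSolving | OnlineCodeStudy/repo1/line_up_the_captives.py | add_blocker
-- ===== SOURCE A (Python) =====
-- def add_blocker(blockers,blocker,left_needed,right_needed):
--     if not blocker:
--         return 0
--     ans = 0
--     if left_needed>0:
--         ans = 1 + add_blocker([blocker]+blockers,blocker-1,left_needed-1,right_needed)
--     if right_needed>0:
--         ans = 1 + add_blocker(blockers+[blocker],blocker-1,left_needed,right_needed-1)
--     return ans
-- ===== SOURCE B (Python) =====
-- def add_blocker(blockers, blocker, left_needed, right_needed):
--     # Closed form: each placement consumes one available blocker and one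
--     # remaining slot (right first, then left), so the count is the smaller
--     # of the two budgets; a negative blocker count means none are available.
--     return min(max(blocker, 0), max(left_needed, 0) + max(right_needed, 0))
-- ===== Notes on version B (the rewrite author's own statement) =====
-- stated objective: simpler
-- what changed: Replaces the double recursion with the one-line closed form min(max(blocker,0), max(left_needed,0)+max(right_needed,0)).
-- intended difference: For negative blocker with a positive left or right need, A's countdown skips 0 and it returns max(left_needed,0)+max(right_needed,0) as if blockers were unlimited; B returns 0, the intended count when no blockers are available. — e.g. on add_blocker([], -1, 1, 0): A returns 1, B returns 0
-- outside the precondition, e.g. on add_blocker([], 9500, 9500, 0): A returns 9500, B returns 9500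
import Mathlib
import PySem

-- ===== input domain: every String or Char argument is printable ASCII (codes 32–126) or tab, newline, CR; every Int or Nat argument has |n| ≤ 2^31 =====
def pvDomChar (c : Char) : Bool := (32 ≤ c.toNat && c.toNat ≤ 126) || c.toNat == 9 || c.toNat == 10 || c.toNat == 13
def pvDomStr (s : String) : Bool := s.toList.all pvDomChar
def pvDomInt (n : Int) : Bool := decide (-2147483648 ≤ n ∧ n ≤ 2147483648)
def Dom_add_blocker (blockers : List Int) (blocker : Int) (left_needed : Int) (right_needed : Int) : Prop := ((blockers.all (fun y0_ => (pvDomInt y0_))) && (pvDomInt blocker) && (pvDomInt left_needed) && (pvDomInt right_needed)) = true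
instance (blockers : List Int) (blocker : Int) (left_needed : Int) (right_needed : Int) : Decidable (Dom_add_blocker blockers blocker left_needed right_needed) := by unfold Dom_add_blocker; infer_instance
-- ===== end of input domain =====

-- B replaces A's double recursion with the one-line closed form
-- min(max(blocker,0), max(left_needed,0)+max(right_needed,0)); on negative blocker with a
-- positive need (D_ below) B returns the intended 0 where A counts placements anyway.

-- ===== PORT A =====
-- literal port of A's recursion, driven by a fuel argument bounding the remaining recursion
-- steps: each call lowers left_needed or right_needed by 1, so max(left_needed,0)+max(right_needed,0)
-- steps always suffice, and with that fuel the 0-fuel branch coincides with Python's return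
-- (both needs are ≤ 0, so both ifs are skipped and ans = 0). The fuel is capped at 20000,
-- far above the ~10^4 recursion depth at which Python raises RecursionError (excluded by
-- Pre_ below), so the port returns Python's value wherever Python returns.
def add_blocker_go (fuel : Nat) (blockers : List Int) (blocker : Int) (left_needed : Int) (right_needed : Int) : Int :=
  match fuel with
  | 0 => 0
  | fuel + 1 =>
    if blocker = 0 then 0
    else
      let ans : Int := 0
      let ans := if left_needed > 0 then
        1 + add_blocker_go fuel (blocker :: blockers) (blocker - 1) (left_needed - 1) right_needed
      else ans
      let ans := if right_needed > 0 then
        1 + add_blocker_go fuel (blockers ++ [blocker]) (blocker - 1) left_needed (right_needed - 1)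
      else ans
      ans

def add_blocker (blockers : List Int) (blocker : Int) (left_needed : Int) (right_needed : Int) : Int :=
  add_blocker_go (min (max left_needed 0 + max right_needed 0).toNat 20000) blockers blocker left_needed right_needed

-- ===== PORT B =====
def add_blocker_alt (blockers : List Int) (blocker : Int) (left_needed : Int) (right_needed : Int) : Int :=
  min (max blocker 0) (max left_needed 0 + max right_needed 0)

-- ===== PRECONDITION & SPEC =====
-- Pre_ excludes exactly the inputs on which Python A raises RecursionError: its recursion
-- depth is min(blocker, positive need) for blocker ≥ 0 and the whole positive need for
-- blocker < 0; the 9000 bound is conservative for the interpreter's stack limit.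
def Pre_add_blocker (blockers : List Int) (blocker : Int) (left_needed : Int) (right_needed : Int) : Prop :=
  (if blocker < 0 then max left_needed 0 + max right_needed 0
   else min blocker (max left_needed 0 + max right_needed 0)) ≤ 9000
instance (blockers : List Int) (blocker : Int) (left_needed : Int) (right_needed : Int) : Decidable (Pre_add_blocker blockers blocker left_needed right_needed) := by unfold Pre_add_blocker; infer_instance

def pvWitness_add_blocker : List Int × Int × Int × Int := ([4, 7], 3, 1, 1)

-- For negative blocker with a positive left or right need, A's countdown skips 0 and it
-- returns max(left_needed,0)+max(right_needed,0) as if blockers were unlimited; B returns 0,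
-- the intended count when no blockers are available.
def D_add_blocker (blockers : List Int) (blocker : Int) (left_needed : Int) (right_needed : Int) : Prop :=
  blocker < 0 ∧ (left_needed > 0 ∨ right_needed > 0)
instance (blockers : List Int) (blocker : Int) (left_needed : Int) (right_needed : Int) : Decidable (D_add_blocker blockers blocker left_needed right_needed) := by unfold D_add_blocker; infer_instance

def Spec_add_blocker (blockers : List Int) (blocker : Int) (left_needed : Int) (right_needed : Int) (out : Int) : Prop := ¬ D_add_blocker blockers blocker left_needed right_needed → out = add_blocker_alt blockers blocker left_needed right_needed
instance (blockers : List Int) (blocker : Int) (left_needed : Int) (right_needed : Int) (out : Int) : Decidable (Spec_add_blocker blockers blocker left_needed right_needed out) := by unfold Spec_add_blocker; infer_instance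

def pvDiffWitness_add_blocker : List Int × Int × Int × Int := ([], -1, 1, 0)
def pvDiffWitnessOut_add_blocker : Int × Int := (1, 0)

-- ===== CLAIM (what is proved, stated in full; the proofs are below) =====
def Claim_unchanged_add_blocker : Prop := ∀ (blockers : List Int) (blocker : Int) (left_needed : Int) (right_needed : Int), Dom_add_blocker blockers blocker left_needed right_needed → Pre_add_blocker blockers blocker left_needed right_needed → Spec_add_blocker blockers blocker left_needed right_needed (add_blocker blockers blocker left_needed right_needed)
def Claim_changed_add_blocker : Prop := Dom_add_blocker (pvDiffWitness_add_blocker.1) (pvDiffWitness_add_blocker.2.1) (pvDiffWitness_add_blocker.2.2.1) (pvDiffWitness_add_blocker.2.2.2) ∧ Pre_add_blocker (pvDiffWitness_add_blocker.1) (pvDiffWitness_add_blocker.2.1) (pvDiffWitness_add_blocker.2.2.1) (pvDiffWitness_add_blocker.2.2.2) ∧ D_add_blocker (pvDiffWitness_add_blocker.1) (pvDiffWitness_add_blocker.2.1) (pvDiffWitness_add_blocker.2.2.1) (pvDiffWitness_add_blocker.2.2.2) ∧ add_blocker (pvDiffWitness_add_blocker.1) (pvDiffWitness_add_blocker.2.1)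 (pvDiffWitness_add_blocker.2.2.1) (pvDiffWitness_add_blocker.2.2.2) = pvDiffWitnessOut_add_blocker.1 ∧ add_blocker_alt (pvDiffWitness_add_blocker.1) (pvDiffWitness_add_blocker.2.1) (pvDiffWitness_add_blocker.2.2.1) (pvDiffWitness_add_blocker.2.2.2) = pvDiffWitnessOut_add_blocker.2 ∧ pvDiffWitnessOut_add_blocker.1 ≠ pvDiffWitnessOut_add_blocker.2
def Claim_exact_add_blocker : Prop := ∀ (blockers : List Int) (blocker : Int) (left_needed : Int) (right_needed : Int), Dom_add_blocker blockers blocker left_needed right_needed → Pre_add_blocker blockers blocker left_needed right_needed → D_add_blocker blockers blocker left_needed right_needed → add_blocker blockers blocker left_needed right_needed ≠ add_blocker_alt blockers blocker left_needed right_needed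

-- ===== LEMMAS AND PROOFS =====
-- A's result in closed form: for blocker ≥ 0 the recursion stops when the countdown or the
-- needs run out; for blocker < 0 the countdown never reaches 0 and the needs are consumed fully.
-- enough fuel (the positive need for blocker < 0, else the smaller of blocker and the need,
-- i.e. the number of steps A actually takes) makes add_blocker_go compute A's closed form.
lemma add_blocker_go_closed (fuel : Nat) : ∀ (bs : List Int) (b l r : Int),
    (if b < 0 then max l 0 + max r 0 else min b (max l 0 + max r 0)).toNat ≤ fuel →
    add_blocker_go fuel bs b l r =
      (if b < 0 then max l 0 + max r 0 else min b (max l 0 + max r 0)) := by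
  induction fuel with
  | zero => intro bs b l r hn; rw [add_blocker_go]; split_ifs <;> omega
  | succ m ih =>
    intro bs b l r hn
    rw [add_blocker_go]
    by_cases hb : b = 0
    · simp only [if_pos hb]; subst hb; norm_num; omega
    rw [if_neg hb]
    by_cases hl : l > 0 <;> by_cases hr : r > 0 <;>
      simp only [hl, hr, if_pos, if_neg, not_false_eq_true]
    · rw [ih _ (b - 1) l (r - 1) (by split_ifs at hn ⊢ <;> omega)]
      split_ifs <;> omega
    · rw [ih _ (b - 1) (l - 1) r (by split_ifs at hn ⊢ <;> omega)]
      split_ifs <;> omega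
    · rw [ih _ (b - 1) l (r - 1) (by split_ifs at hn ⊢ <;> omega)]
      split_ifs <;> omega
    · split_ifs <;> omega

-- Pre_ (depth ≤ 9000) keeps the steps below the 20000 fuel cap.
lemma add_blocker_closed (bs : List Int) (b l r : Int)
    (h : (if b < 0 then max l 0 + max r 0 else min b (max l 0 + max r 0)) ≤ 9000) :
    add_blocker bs b l r =
      (if b < 0 then max l 0 + max r 0 else min b (max l 0 + max r 0)) := by
  rw [add_blocker]
  exact add_blocker_go_closed _ bs b l r (by split_ifs at h ⊢ <;> omega)

-- ===== VERDICT (by name: the statement is the Claim_ definition above) =====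
theorem add_blocker_spec : Claim_unchanged_add_blocker := by
  intro bs b l r _ hpre hnd
  unfold Pre_add_blocker at hpre
  unfold D_add_blocker at hnd
  unfold add_blocker_alt
  rw [add_blocker_closed bs b l r hpre]
  split_ifs <;> omega

theorem add_blocker_changed : Claim_changed_add_blocker := by
  unfold Claim_changed_add_blocker
  refine ⟨by decide, by decide, by decide, ?_, by decide, by decide⟩
  show add_blocker [] (-1) 1 0 = 1
  rw [add_blocker_closed [] (-1) 1 0 (by norm_num)]
  norm_num

theorem add_blocker_tight : Claim_exact_add_blocker := by
  intro bs b l r _ hpre hd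
  unfold Pre_add_blocker at hpre
  unfold D_add_blocker at hd
  unfold add_blocker_alt
  rw [add_blocker_closed bs b l r hpre]
  split_ifs <;> omega
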